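-- pv_equiv track=rewrite | github.com/gomin0/algorithm-study | 프로그래머스/4/17685. ［3차］ 자동완성/［3차］ 자동완성.py | solution
-- ===== SOURCE A (Python) =====
-- def solution(words):
--     answer: int = 0
--     words.sort()
--
--     for i, word in enumerate(words):
--         prev: int = 0
--         next: int = 0
--         if i > 0:
--             prev = common_prefix(words[i-1], word)
--         if i < len(words) - 1:
--             next = common_prefix(words[i+1], word)
--
--         need: int = max(prev, next) + 1
--         answer += min(len(word), need)
--
--     return answer
--
-- def common_prefix(w1, w2):
--     count: int = 0
--     for x, y in zip(w1, w2):
--         if x == y: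
--             count += 1
--         else:
--             break
--     return count
-- ===== SOURCE B (Python) =====
-- def solution(words):
--     # same observable in-place mutation as the original: sort the list
--     words.sort()
--     cnt = {}
--     for w in words:
--         for i in range(1, len(w) + 1):
--             p = w[:i]
--             cnt[p] = cnt.get(p, 0) + 1
--     total = 0
--     for w in words:
--         k = 0
--         for i in range(1, len(w) + 1):
--             k += 1
--             if cnt[w[:i]] == 1:
--                 break
--         total += k
--     return total
-- ===== Notes on version B (the rewrite author's own statement) =====
-- stated objective: alternative
-- what changed: Instead of sorting and comparing each word with its two sorted neighbours, B builds a prefix counter (a flat trie: occurrence count per prefix) over all words and, per word, types characters until its current prefix has count 1 or the word ends; the sort is kept only for A's observable in-place mutation (B's answer does not depend on it); equivalence rests on the lemma that in lexicographic order the neighbour common prefixes dominate all others.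
import Mathlib
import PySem

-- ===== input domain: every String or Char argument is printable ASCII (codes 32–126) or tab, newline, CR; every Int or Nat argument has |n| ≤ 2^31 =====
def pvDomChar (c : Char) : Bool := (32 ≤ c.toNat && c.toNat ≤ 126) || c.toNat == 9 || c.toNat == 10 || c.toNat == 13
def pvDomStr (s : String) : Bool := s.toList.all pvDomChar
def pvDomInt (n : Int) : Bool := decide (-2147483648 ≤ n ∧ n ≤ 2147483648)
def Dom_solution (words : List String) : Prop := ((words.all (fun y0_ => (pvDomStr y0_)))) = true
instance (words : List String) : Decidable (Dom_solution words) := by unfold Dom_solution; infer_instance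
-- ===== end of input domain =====

-- B replaces A's sort-and-compare-with-two-neighbours scheme by a prefix counter (a flat trie:
-- occurrence count per prefix) and per-word typing until the current prefix is unique; the sort is
-- kept only for A's observable in-place mutation of `words` (both Pythons sort in place, so the
-- side effect is identical; the equivalence proved here is about the return value).


-- ===== PORT A =====
-- 'for x, y in zip(w1, w2): if x == y: count += 1 else: break'
def cpAgo : List (Char × Char) → Int → Int
  | [], count => count
  | (x, y) :: rest, count => if x = y then cpAgo rest (count + 1) else count
def common_prefix (w1 w2 : String) : Int := cpAgo (List.zip w1.toList w2.toList) 0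

def solution (words : List String) : Int :=
  let ws := PySem.List.sorted words (fun w => w) false
  (PySem.List.enumerate ws 0).foldl (fun answer iw =>
    let prev : Int := if iw.1 > 0 then common_prefix (PySem.List.pyGetD ws (iw.1 - 1) "") iw.2 else 0
    let next : Int := if iw.1 < PySem.List.len ws - 1 then common_prefix (PySem.List.pyGetD ws (iw.1 + 1) "") iw.2 else 0
    let need : Int := max prev next + 1
    answer + min (PySem.Str.len iw.2) need) 0

-- ===== PORT B =====
-- the inner keystroke loop with its 'break' becomes structural recursion on the range list
def countKeysGo (cnt : PySem.Dict String Int) (w : String) : List Int → Int → Int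
  | [], k => k
  | i :: rest, k =>
    if cnt.getD (PySem.Str.slice w none (some i)) 0 == 1 then k + 1
    else countKeysGo cnt w rest (k + 1)

def countKeys (cnt : PySem.Dict String Int) (w : String) : Int :=
  countKeysGo cnt w (PySem.List.pyRange 1 (PySem.Str.len w + 1) 1) 0

def solution_alt (words : List String) : Int :=
  let ws := PySem.List.sorted words (fun w => w) false
  let cnt := ws.foldl (fun cnt w =>
    (PySem.List.pyRange 1 (PySem.Str.len w + 1) 1).foldl (fun cnt i =>
      cnt.insert (PySem.Str.slice w none (some i))
        (cnt.getD (PySem.Str.slice w none (some i)) 0 + 1)) cnt)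
    PySem.Dict.empty
  ws.foldl (fun total w => total + countKeys cnt w) 0

-- ===== PRECONDITION & SPEC =====
def Spec_solution (words : List String) (out : Int) : Prop := out = solution_alt words
instance (words : List String) (out : Int) : Decidable (Spec_solution words out) := by unfold Spec_solution; infer_instance

-- ===== CLAIM (what is proved, stated in full; the proofs are below) =====
def Claim_equal_solution : Prop := ∀ (words : List String), Dom_solution words → Spec_solution words (solution words)

-- ===== LEMMAS AND PROOFS =====

-- the common-prefix length, structurally (proof-side only)
def cpB : List Char → List Char → Int
  | x :: xs, y :: ys => if x = y then 1 + cpB xs ys else 0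
  | _, _ => 0
def cpLen (w u : String) : Int := cpB w.toList u.toList

theorem cpB_nonneg (a b : List Char) : 0 ≤ cpB a b := by
  induction a generalizing b with
  | nil => simp [cpB]
  | cons x xs ih =>
    cases b with
    | nil => simp [cpB]
    | cons y ys =>
      simp only [cpB]
      split_ifs with h
      · have := ih ys; omega
      · omega

theorem cpAgo_eq (a b : List Char) (c : Int) : cpAgo (List.zip a b) c = c + cpB a b := by
  induction a generalizing b c with
  | nil => simp [cpAgo, cpB]
  | cons x xs ih =>
    cases b with
    | nil => simp [cpAgo, cpB]
    | cons y ys =>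
      simp only [List.zip_cons_cons, cpAgo, cpB]
      split_ifs with h
      · rw [ih]; omega
      · omega

theorem common_prefix_eq (w u : String) : common_prefix w u = cpB w.toList u.toList := by
  rw [common_prefix, cpAgo_eq, zero_add]

theorem cpB_comm (a b : List Char) : cpB a b = cpB b a := by
  induction a generalizing b with
  | nil => cases b <;> simp [cpB]
  | cons x xs ih =>
    cases b with
    | nil => simp [cpB]
    | cons y ys =>
      simp only [cpB]
      rcases eq_or_ne x y with rfl | h
      · simp [ih]
      · simp [h, Ne.symm h]

theorem cons_le_cases {x y : Char} {xs ys : List Char} (h : (x :: xs : List Char) ≤ (y :: ys)) :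
    x < y ∨ (x = y ∧ xs ≤ ys) := by
  rcases lt_or_eq_of_le h with h' | h'
  · rcases List.cons_lt_cons_iff.mp h' with h'' | ⟨rfl, h''⟩
    · exact Or.inl h''
    · exact Or.inr ⟨rfl, le_of_lt h''⟩
  · obtain ⟨rfl, rfl⟩ := List.cons.inj h'
    exact Or.inr ⟨rfl, le_refl _⟩

theorem not_cons_le_nil (x : Char) (xs : List Char) : ¬ ((x :: xs : List Char) ≤ []) := by simp

-- the key lemma: between a ≤ b ≤ c, the common prefix with an endpoint is at least cp a c
theorem cpB_between {a b c : List Char} (hab : a ≤ b) (hbc : b ≤ c) :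
    cpB a c ≤ cpB b c ∧ cpB a c ≤ cpB a b := by
  induction a generalizing b c with
  | nil => constructor <;> { cases c <;> simp [cpB, cpB_nonneg] }
  | cons x xs ih =>
    cases c with
    | nil =>
      constructor <;> simp [cpB, cpB_nonneg]
    | cons z cs =>
      rcases eq_or_ne x z with rfl | hxz
      · cases b with
        | nil => exact absurd hab (not_cons_le_nil _ _)
        | cons y bs =>
          rcases cons_le_cases hab with hlt | ⟨heq1, hxb⟩
          · rcases cons_le_cases hbc with hlt2 | ⟨heq2, _⟩
            · exact absurd (lt_trans hlt hlt2) (lt_irrefl x)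
            · exact absurd (heq2 ▸ hlt) (lt_irrefl x)
          · rcases cons_le_cases hbc with hlt2 | ⟨heq2, hbc'⟩
            · exact absurd (heq1 ▸ hlt2) (lt_irrefl x)
            · subst heq1
              have := ih hxb hbc'
              simp only [cpB, if_true, eq_self_iff_true]
              omega
      · have h0 : cpB (x :: xs) (z :: cs) = 0 := by simp [cpB, hxz]
        rw [h0]
        exact ⟨cpB_nonneg _ _, cpB_nonneg _ _⟩

theorem foldl_maxif_init_le {β : Type} (p : β → Prop) [DecidablePred p] (f : β → Int)
    (l : List β) (a : Int) :
    a ≤ l.foldl (fun m x => if p x then max m (f x) else m) a := by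
  induction l generalizing a with
  | nil => simp
  | cons x xs ih =>
    simp only [List.foldl_cons]
    split_ifs with h
    · exact le_trans (le_max_left _ _) (ih _)
    · exact ih _

theorem foldl_maxif_le {β : Type} (p : β → Prop) [DecidablePred p] (f : β → Int)
    (l : List β) (a M : Int) (ha : a ≤ M) (h : ∀ x ∈ l, p x → f x ≤ M) :
    l.foldl (fun m x => if p x then max m (f x) else m) a ≤ M := by
  induction l generalizing a with
  | nil => simpa
  | cons x xs ih =>
    simp only [List.foldl_cons]
    split_ifs with hp
    · exact ih _ (max_le ha (h x (by simp) hp)) (fun y hy => h y (by simp [hy]))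
    · exact ih _ ha (fun y hy => h y (by simp [hy]))

theorem le_foldl_maxif {β : Type} (p : β → Prop) [DecidablePred p] (f : β → Int)
    (l : List β) (a : Int) (x : β) (hx : x ∈ l) (hp : p x) :
    f x ≤ l.foldl (fun m y => if p y then max m (f y) else m) a := by
  induction l generalizing a with
  | nil => cases hx
  | cons z zs ih =>
    simp only [List.foldl_cons]
    rcases List.mem_cons.mp hx with rfl | hx'
    · rw [if_pos hp]
      exact le_trans (le_max_right _ _) (foldl_maxif_init_le _ _ _ _)
    · split_ifs <;> exact ih _ hx'

theorem term_eq (ws : List String) (hp : ws.Pairwise (· ≤ ·)) (k : Nat) (hk : k < ws.length) :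
    max (if (k : Int) > 0 then common_prefix (PySem.List.pyGetD ws ((k : Int) - 1) "") ws[k] else 0)
        (if (k : Int) < PySem.List.len ws - 1 then common_prefix (PySem.List.pyGetD ws ((k : Int) + 1) "") ws[k] else 0)
      = (PySem.List.enumerate ws 0).foldl
          (fun m ju => if ju.1 ≠ (k : Int) then max m (cpLen ws[k] ju.2) else m) 0 := by
  have hpg := List.pairwise_iff_getElem.mp hp
  have hstep : ∀ (i : Nat) (h : i + 1 < ws.length), ws[i] ≤ ws[i+1] := fun i h =>
    hpg i (i+1) (by omega) h (by omega)
  have hle : ∀ (i j : Nat) (hi : i < ws.length) (hj : j < ws.length), i ≤ j → ws[i] ≤ ws[j] := by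
    intro i j hi hj hij
    rcases Nat.lt_or_ge i j with h | h
    · exact hpg i j hi hj h
    · have : i = j := by omega
      subst this; exact le_refl _
  -- the two neighbour prefixes, named
  by_cases hk0 : 0 < k <;> by_cases hklast : k + 1 < ws.length
  -- case pos.pos
  ·
    have hkm : k - 1 < ws.length := by omega
    have e1 : (k : Int) - 1 = ((k - 1 : Nat) : Int) := by omega
    have e2 : (k : Int) + 1 = ((k + 1 : Nat) : Int) := by omega
    have hprev : (if (k : Int) > 0 then common_prefix (PySem.List.pyGetD ws ((k : Int) - 1) "") ws[k] else 0)
        = cpB (ws[k-1]).toList (ws[k]).toList := by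
      rw [if_pos (by omega), e1, PySem.List.pyGetD_natCast, List.getD_eq_getElem ws "" hkm,
        common_prefix_eq]
    have hnext : (if (k : Int) < PySem.List.len ws - 1 then common_prefix (PySem.List.pyGetD ws ((k : Int) + 1) "") ws[k] else 0)
        = cpB (ws[k+1]).toList (ws[k]).toList := by
      rw [if_pos (by simp [PySem.List.len_eq]; omega), e2, PySem.List.pyGetD_natCast,
        List.getD_eq_getElem ws "" hklast, common_prefix_eq]
    rw [hprev, hnext]
    apply le_antisymm
    · apply max_le
      · calc cpB (ws[k-1]).toList (ws[k]).toList
            = cpLen ws[k] ws[k-1] := by rw [cpLen, cpB_comm]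
          _ ≤ _ := le_foldl_maxif (fun ju : Int × String => ju.1 ≠ (k : Int)) (fun ju => cpLen ws[k] ju.2) (PySem.List.enumerate ws 0) 0 ((0 : Int) + ((k-1 : Nat) : Int), ws[k-1])
                ((PySem.List.mem_enumerate_iff _ _ _).mpr ⟨k-1, hkm, rfl⟩) (by intro hcontra; simp at hcontra <;> omega)
      · calc cpB (ws[k+1]).toList (ws[k]).toList
            = cpLen ws[k] ws[k+1] := by rw [cpLen, cpB_comm]
          _ ≤ _ := le_foldl_maxif (fun ju : Int × String => ju.1 ≠ (k : Int)) (fun ju => cpLen ws[k] ju.2) (PySem.List.enumerate ws 0) 0 ((0 : Int) + ((k+1 : Nat) : Int), ws[k+1])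
                ((PySem.List.mem_enumerate_iff _ _ _).mpr ⟨k+1, hklast, rfl⟩) (by intro hcontra; simp at hcontra <;> omega)
    · apply foldl_maxif_le (fun ju : Int × String => ju.1 ≠ (k : Int)) (fun ju => cpLen ws[k] ju.2)
      · exact le_trans (cpB_nonneg _ _) (le_max_left _ _)
      · rintro ju hju hne
        obtain ⟨j, hj, rfl⟩ := (PySem.List.mem_enumerate_iff _ _ _).mp hju
        simp only [zero_add] at hne ⊢
        have hjk : j ≠ k := fun h => hne (by rw [h])
        rcases Nat.lt_or_ge j k with hlt | hge
        · refine le_trans ?_ (le_max_left _ _)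
          have h1 : ws[j] ≤ ws[k-1] := hle j (k-1) hj hkm (by omega)
          have h2 : ws[k-1] ≤ ws[k] := hle (k-1) k hkm hk (by omega)
          calc cpLen ws[k] ws[j] = cpB (ws[j]).toList (ws[k]).toList := by rw [cpLen, cpB_comm]
            _ ≤ cpB (ws[k-1]).toList (ws[k]).toList :=
                (cpB_between (String.le_iff_toList_le.mp h1) (String.le_iff_toList_le.mp h2)).1
        · refine le_trans ?_ (le_max_right _ _)
          have h1 : ws[k] ≤ ws[k+1] := hle k (k+1) hk hklast (by omega)
          have h2 : ws[k+1] ≤ ws[j] := hle (k+1) j hklast hj (by omega)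
          calc cpLen ws[k] ws[j] = cpB (ws[k]).toList (ws[j]).toList := rfl
            _ ≤ cpB (ws[k]).toList (ws[k+1]).toList :=
                (cpB_between (String.le_iff_toList_le.mp h1) (String.le_iff_toList_le.mp h2)).2
            _ = cpB (ws[k+1]).toList (ws[k]).toList := cpB_comm _ _
  -- case pos.neg
  ·
    have hkm : k - 1 < ws.length := by omega
    have e1 : (k : Int) - 1 = ((k - 1 : Nat) : Int) := by omega
    have hprev : (if (k : Int) > 0 then common_prefix (PySem.List.pyGetD ws ((k : Int) - 1) "") ws[k] else 0)
        = cpB (ws[k-1]).toList (ws[k]).toList := by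
      rw [if_pos (by omega), e1, PySem.List.pyGetD_natCast, List.getD_eq_getElem ws "" hkm,
        common_prefix_eq]
    have hnext : (if (k : Int) < PySem.List.len ws - 1 then common_prefix (PySem.List.pyGetD ws ((k : Int) + 1) "") ws[k] else 0) = 0 := by
      rw [if_neg (by simp [PySem.List.len_eq]; omega)]
    rw [hprev, hnext]
    apply le_antisymm
    · apply max_le
      · calc cpB (ws[k-1]).toList (ws[k]).toList
            = cpLen ws[k] ws[k-1] := by rw [cpLen, cpB_comm]
          _ ≤ _ := le_foldl_maxif (fun ju : Int × String => ju.1 ≠ (k : Int)) (fun ju => cpLen ws[k] ju.2) (PySem.List.enumerate ws 0) 0 ((0 : Int) + ((k-1 : Nat) : Int), ws[k-1])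
                ((PySem.List.mem_enumerate_iff _ _ _).mpr ⟨k-1, hkm, rfl⟩) (by intro hcontra; simp at hcontra <;> omega)
      · exact foldl_maxif_init_le (fun ju : Int × String => ju.1 ≠ (k : Int)) (fun ju => cpLen ws[k] ju.2) (PySem.List.enumerate ws 0) 0
    · apply foldl_maxif_le (fun ju : Int × String => ju.1 ≠ (k : Int)) (fun ju => cpLen ws[k] ju.2)
      · exact le_trans (cpB_nonneg _ _) (le_max_left _ _)
      · rintro ju hju hne
        obtain ⟨j, hj, rfl⟩ := (PySem.List.mem_enumerate_iff _ _ _).mp hju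
        simp only [zero_add] at hne ⊢
        have hjk : j ≠ k := fun h => hne (by rw [h])
        have hlt : j < k := by omega
        refine le_trans ?_ (le_max_left _ _)
        have h1 : ws[j] ≤ ws[k-1] := hle j (k-1) hj hkm (by omega)
        have h2 : ws[k-1] ≤ ws[k] := hle (k-1) k hkm hk (by omega)
        calc cpLen ws[k] ws[j] = cpB (ws[j]).toList (ws[k]).toList := by rw [cpLen, cpB_comm]
          _ ≤ cpB (ws[k-1]).toList (ws[k]).toList :=
              (cpB_between (String.le_iff_toList_le.mp h1) (String.le_iff_toList_le.mp h2)).1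
  -- case neg.pos
  ·
    have e2 : (k : Int) + 1 = ((k + 1 : Nat) : Int) := by omega
    have hprev : (if (k : Int) > 0 then common_prefix (PySem.List.pyGetD ws ((k : Int) - 1) "") ws[k] else 0) = 0 := by
      rw [if_neg (by omega)]
    have hnext : (if (k : Int) < PySem.List.len ws - 1 then common_prefix (PySem.List.pyGetD ws ((k : Int) + 1) "") ws[k] else 0)
        = cpB (ws[k+1]).toList (ws[k]).toList := by
      rw [if_pos (by simp [PySem.List.len_eq]; omega), e2, PySem.List.pyGetD_natCast,
        List.getD_eq_getElem ws "" hklast, common_prefix_eq]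
    rw [hprev, hnext]
    apply le_antisymm
    · apply max_le
      · exact foldl_maxif_init_le (fun ju : Int × String => ju.1 ≠ (k : Int)) (fun ju => cpLen ws[k] ju.2) (PySem.List.enumerate ws 0) 0
      · calc cpB (ws[k+1]).toList (ws[k]).toList
            = cpLen ws[k] ws[k+1] := by rw [cpLen, cpB_comm]
          _ ≤ _ := le_foldl_maxif (fun ju : Int × String => ju.1 ≠ (k : Int)) (fun ju => cpLen ws[k] ju.2) (PySem.List.enumerate ws 0) 0 ((0 : Int) + ((k+1 : Nat) : Int), ws[k+1])
                ((PySem.List.mem_enumerate_iff _ _ _).mpr ⟨k+1, hklast, rfl⟩) (by intro hcontra; simp at hcontra <;> omega)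
    · apply foldl_maxif_le (fun ju : Int × String => ju.1 ≠ (k : Int)) (fun ju => cpLen ws[k] ju.2)
      · exact le_trans (cpB_nonneg _ _) (le_max_right _ _)
      · rintro ju hju hne
        obtain ⟨j, hj, rfl⟩ := (PySem.List.mem_enumerate_iff _ _ _).mp hju
        simp only [zero_add] at hne ⊢
        have hjk : j ≠ k := fun h => hne (by rw [h])
        have hgt : k < j := by omega
        refine le_trans ?_ (le_max_right _ _)
        have h1 : ws[k] ≤ ws[k+1] := hle k (k+1) hk hklast (by omega)
        have h2 : ws[k+1] ≤ ws[j] := hle (k+1) j hklast hj (by omega)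
        calc cpLen ws[k] ws[j] = cpB (ws[k]).toList (ws[j]).toList := rfl
          _ ≤ cpB (ws[k]).toList (ws[k+1]).toList :=
              (cpB_between (String.le_iff_toList_le.mp h1) (String.le_iff_toList_le.mp h2)).2
          _ = cpB (ws[k+1]).toList (ws[k]).toList := cpB_comm _ _
  -- case neg.neg
  ·
    -- the single-word (or the only index) case: k = 0 and k = len - 1
    have hprev : (if (k : Int) > 0 then common_prefix (PySem.List.pyGetD ws ((k : Int) - 1) "") ws[k] else 0) = 0 := by
      rw [if_neg (by omega)]
    have hnext : (if (k : Int) < PySem.List.len ws - 1 then common_prefix (PySem.List.pyGetD ws ((k : Int) + 1) "") ws[k] else 0) = 0 := by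
      rw [if_neg (by simp [PySem.List.len_eq]; omega)]
    rw [hprev, hnext]
    apply le_antisymm
    · simpa using foldl_maxif_init_le (fun ju : Int × String => ju.1 ≠ (k : Int)) (fun ju => cpLen ws[k] ju.2) _ 0
    · apply foldl_maxif_le (fun ju : Int × String => ju.1 ≠ (k : Int)) (fun ju => cpLen ws[k] ju.2)
      · simp
      · rintro ju hju hne
        obtain ⟨j, hj, rfl⟩ := (PySem.List.mem_enumerate_iff _ _ _).mp hju
        simp only [zero_add] at hne
        exact absurd (by omega : j = k) (fun h => hne (by rw [h]))

-- proof-side: the maximum common prefix with any other position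
def maxOther (ws : List String) (k : Nat) (w : String) : Int :=
  (PySem.List.enumerate ws 0).foldl
    (fun m ju => if ju.1 ≠ (k : Int) then max m (cpLen w ju.2) else m) 0

theorem getD_foldl_inc (l : List String) (d : PySem.Dict String Int) (p : String) :
    (l.foldl (fun c q => c.insert q (c.getD q 0 + 1)) d).getD p 0
      = d.getD p 0 + (l.count p : Int) := by
  induction l generalizing d with
  | nil => simp
  | cons q t ih =>
    simp only [List.foldl_cons, ih, PySem.Dict.getD_insert, List.count_cons]
    rcases eq_or_ne p q with rfl | h
    · simp only [if_pos rfl, BEq.rfl, if_true]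
      push_cast; ring
    · have hqp : (q == p) = false := by simp [Ne.symm h]
      simp [h, hqp]

theorem take_succ_eq_iff {wl pl : List Char} {k : Nat} (hk : k + 1 ≤ wl.length) :
    wl.take (k + 1) = pl ↔ (pl.length = k + 1 ∧ pl <+: wl) := by
  constructor
  · rintro rfl
    exact ⟨by simp [Nat.min_eq_left hk], List.take_prefix _ _⟩
  · rintro ⟨hlen, hpre⟩
    rw [List.prefix_iff_eq_take] at hpre
    rw [← hlen, ← hpre]

theorem count_slices (w p : String) (hp : p.toList ≠ []) :
    (((PySem.List.pyRange 1 (PySem.Str.len w + 1) 1).map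
        (fun i => PySem.Str.slice w none (some i))).count p : Int)
      = if p.toList <+: w.toList then 1 else 0 := by
  have hL : ((w.toList.length : Int) + 1 - 1).toNat = w.toList.length := by omega
  rw [PySem.Str.len_eq, PySem.List.pyRange_one, hL, List.map_map, List.count_eq_countP,
    List.countP_map]
  have hpred : ∀ k ∈ List.range w.toList.length,
      ((fun x => x == p) ∘ ((fun i => PySem.Str.slice w none (some i)) ∘ (fun k : Nat => (1:Int) + k))) k
        = decide (p.toList.length = k + 1 ∧ p.toList <+: w.toList) := by
    intro k hk
    have hk' : k < w.toList.length := List.mem_range.mp hk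
    have h1 : (0:Int) ≤ 1 + (k:Int) := by omega
    have hcast : (1 + (k:Int)) = ((k + 1 : Nat) : Int) := by omega
    have hsl : (PySem.Str.slice w none (some (1 + (k:Int)))).toList = w.toList.take (k+1) := by
      rw [PySem.Str.toList_slice, PySem.Chars.slice_eq_listSlice, hcast,
        PySem.List.slice_to_natCast]
    have hbeq : ((PySem.Str.slice w none (some (1+(k:Int)))) == p)
        = decide ((PySem.Str.slice w none (some (1+(k:Int)))).toList = p.toList) := by
      rw [Bool.eq_iff_iff, beq_iff_eq, decide_eq_true_eq, String.toList_inj]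
    simp only [Function.comp]
    rw [hbeq, hsl, decide_eq_decide, take_succ_eq_iff (by omega)]
  rw [List.countP_congr (fun a ha => by rw [hpred a ha])]
  by_cases hpre : p.toList <+: w.toList
  · simp only [hpre, and_true]
    have hm1 : 1 ≤ p.toList.length := by
      cases hc : p.toList with
      | nil => exact absurd hc hp
      | cons a t => simp
    have hmL : p.toList.length ≤ w.toList.length := hpre.length_le
    have hpt : ∀ k, (decide (p.toList.length = k + 1)) = (k == p.toList.length - 1) := by
      intro k
      rw [Bool.eq_iff_iff, decide_eq_true_eq, beq_iff_eq]
      omega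
    rw [List.countP_congr (fun k hk => by rw [hpt k]), ← List.count_eq_countP, List.count_range]
    rw [if_pos (show p.toList.length - 1 < w.toList.length by omega)]
    simp
  · simp only [hpre, and_false, decide_false]
    simp

theorem inner_fold_eq (w : String) (d : PySem.Dict String Int) :
    (PySem.List.pyRange 1 (PySem.Str.len w + 1) 1).foldl (fun cnt i =>
        cnt.insert (PySem.Str.slice w none (some i))
          (cnt.getD (PySem.Str.slice w none (some i)) 0 + 1)) d
      = ((PySem.List.pyRange 1 (PySem.Str.len w + 1) 1).map
          (fun i => PySem.Str.slice w none (some i))).foldl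
          (fun c q => c.insert q (c.getD q 0 + 1)) d := by
  rw [List.foldl_map]

theorem cnt_getD (ws : List String) (d : PySem.Dict String Int) (p : String)
    (hp : p.toList ≠ []) :
    (ws.foldl (fun cnt w =>
      (PySem.List.pyRange 1 (PySem.Str.len w + 1) 1).foldl (fun cnt i =>
        cnt.insert (PySem.Str.slice w none (some i))
          (cnt.getD (PySem.Str.slice w none (some i)) 0 + 1)) cnt) d).getD p 0
      = d.getD p 0 + (ws.countP (fun u => decide (p.toList <+: u.toList)) : Int) := by
  induction ws generalizing d with
  | nil => simp
  | cons w t ih =>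
    simp only [List.foldl_cons, ih, List.countP_cons]
    rw [inner_fold_eq, getD_foldl_inc, count_slices w p hp]
    simp only [decide_eq_true_eq]
    push_cast
    split_ifs with h <;> ring

theorem cpB_le_iff_take_prefix (a b : List Char) (i : Nat) (h : i ≤ a.length) :
    ((i : Int) ≤ cpB a b) ↔ a.take i <+: b := by
  induction i generalizing a b with
  | zero => simp [cpB_nonneg]
  | succ n ih =>
    cases a with
    | nil => simp at h
    | cons x xs =>
      cases b with
      | nil =>
        constructor
        · intro hle
          have : cpB (x :: xs) [] = 0 := rfl
          omega
        · intro hpre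
          simp at hpre
      | cons y ys =>
        simp only [cpB, List.take_succ_cons]
        rcases eq_or_ne x y with rfl | hxy
        · rw [if_pos rfl]
          have := ih xs ys (by simpa using h)
          constructor
          · intro hle
            exact List.cons_prefix_cons.mpr ⟨rfl, this.mp (by omega)⟩
          · intro hpre
            have := this.mpr (List.cons_prefix_cons.mp hpre).2
            omega
        · rw [if_neg hxy]
          constructor
          · intro hle; omega
          · intro hpre
            exact absurd (List.cons_prefix_cons.mp hpre).1 hxy

theorem countP_eq_one_iff_index (l : List String) (pr : String → Bool) (k : Nat)
    (hk : k < l.length) (hkp : pr l[k] = true) :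
    l.countP pr = 1 ↔ ∀ j (hj : j < l.length), j ≠ k → pr l[j] = false := by
  have hdecomp : l = l.take k ++ l[k] :: l.drop (k+1) := by
    rw [← List.drop_eq_getElem_cons hk, List.take_append_drop]
  have hceq : l.countP pr = (l.take k).countP pr + ((l.drop (k+1)).countP pr + 1) := by
    conv_lhs => rw [hdecomp]
    rw [List.countP_append, List.countP_cons, if_pos hkp]
  have hlen : (l.take k).length = k := by simp [Nat.min_eq_left (le_of_lt hk)]
  have hdlen : (l.drop (k+1)).length = l.length - (k+1) := by simp
  constructor
  · intro h1 j hj hjk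
    have ht : (l.take k).countP pr = 0 := by omega
    have hd : (l.drop (k+1)).countP pr = 0 := by omega
    rcases Nat.lt_or_ge j k with hlt | hge
    · have hmem : l[j] ∈ l.take k := by
        rw [List.mem_iff_getElem]
        exact ⟨j, by omega, by rw [List.getElem_take]⟩
      simpa using List.countP_eq_zero.mp ht _ hmem
    · have hgt : k + 1 ≤ j := by omega
      have hmem : l[j] ∈ l.drop (k+1) := by
        rw [List.mem_iff_getElem]
        refine ⟨j - (k+1), by omega, ?_⟩
        rw [List.getElem_drop]
        congr 1
        omega
      simpa using List.countP_eq_zero.mp hd _ hmem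
  · intro hall
    have ht : (l.take k).countP pr = 0 := by
      rw [List.countP_eq_zero]
      intro a ha
      rw [List.mem_iff_getElem] at ha
      obtain ⟨j, hj, rfl⟩ := ha
      rw [List.getElem_take]
      simp only [Bool.not_eq_true]
      exact hall j (by omega) (by omega)
    have hd : (l.drop (k+1)).countP pr = 0 := by
      rw [List.countP_eq_zero]
      intro a ha
      rw [List.mem_iff_getElem] at ha
      obtain ⟨j, hj, rfl⟩ := ha
      rw [List.getElem_drop]
      simp only [Bool.not_eq_true]
      exact hall (k+1+j) (by omega) (by omega)
    omega

def cntOf (ws : List String) : PySem.Dict String Int :=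
  ws.foldl (fun cnt w =>
    (PySem.List.pyRange 1 (PySem.Str.len w + 1) 1).foldl (fun cnt i =>
      cnt.insert (PySem.Str.slice w none (some i))
        (cnt.getD (PySem.Str.slice w none (some i)) 0 + 1)) cnt)
    PySem.Dict.empty

theorem maxOther_nonneg (ws : List String) (k : Nat) (w : String) : 0 ≤ maxOther ws k w :=
  foldl_maxif_init_le (fun ju : Int × String => ju.1 ≠ (k : Int))
    (fun ju => cpLen w ju.2) (PySem.List.enumerate ws 0) 0

theorem maxOther_lt_iff (ws : List String) (k : Nat) (w : String) (i : Int) (hi : 1 ≤ i) :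
    maxOther ws k w < i ↔
      ∀ j (hj : j < ws.length), j ≠ k → cpB w.toList (ws[j]).toList < i := by
  constructor
  · intro hF j hj hjk
    have hmem : ((0 : Int) + (j : Nat), ws[j]) ∈ PySem.List.enumerate ws 0 :=
      (PySem.List.mem_enumerate_iff _ _ _).mpr ⟨j, hj, rfl⟩
    have hle := le_foldl_maxif (fun ju : Int × String => ju.1 ≠ (k : Int))
      (fun ju => cpLen w ju.2) (PySem.List.enumerate ws 0) 0 _ hmem
      (by intro hcontra; simp at hcontra <;> omega)
    simp only [] at hle
    unfold maxOther at hF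
    change cpB w.toList (ws[j]).toList ≤ _ at hle
    omega
  · intro hall
    have := foldl_maxif_le (fun ju : Int × String => ju.1 ≠ (k : Int))
      (fun ju => cpLen w ju.2) (PySem.List.enumerate ws 0) 0 (i - 1) (by omega)
      (by
        rintro ju hju hne
        obtain ⟨j, hj, rfl⟩ := (PySem.List.mem_enumerate_iff _ _ _).mp hju
        simp only [zero_add] at hne ⊢
        have hjk : j ≠ k := fun h => hne (by rw [h])
        have := hall j hj hjk
        change cpB w.toList (ws[j]).toList ≤ _
        omega)
    simp only [] at this
    unfold maxOther
    omega

theorem cnt_cond (ws : List String) (k : Nat) (hk : k < ws.length) (i : Int)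
    (h1 : 1 ≤ i) (hiL : i ≤ ((ws[k].toList.length : Nat) : Int)) :
    ((cntOf ws).getD (PySem.Str.slice ws[k] none (some i)) 0 == 1)
      = decide (maxOther ws k ws[k] < i) := by
  have h0 : (0 : Int) ≤ i := by omega
  have hi2 : i = ((i.toNat : Nat) : Int) := by omega
  have hptl : (PySem.Str.slice ws[k] none (some i)).toList = (ws[k]).toList.take i.toNat := by
    rw [PySem.Str.toList_slice, PySem.Chars.slice_eq_listSlice, hi2,
      PySem.List.slice_to_natCast]
    congr 1
  have hlen1 : ((ws[k]).toList.take i.toNat).length = i.toNat := by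
    rw [List.length_take]
    omega
  have hpne : (PySem.Str.slice ws[k] none (some i)).toList ≠ [] := by
    rw [hptl]
    intro hcon
    rw [hcon] at hlen1
    simp at hlen1
    omega
  have hgd := cnt_getD ws PySem.Dict.empty (PySem.Str.slice ws[k] none (some i)) hpne
  rw [cntOf, hgd, PySem.Dict.getD_empty]
  have hself : (decide ((PySem.Str.slice ws[k] none (some i)).toList <+: (ws[k]).toList)) = true := by
    rw [hptl]
    simp [List.take_prefix]
  rw [Bool.eq_iff_iff, beq_iff_eq, decide_eq_true_eq]
  rw [maxOther_lt_iff ws k ws[k] i h1]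
  have hcast : ((i.toNat : Nat) : Int) = i := by omega
  have hcp : ∀ j (hj : j < ws.length), j ≠ k →
      ((decide ((PySem.Str.slice ws[k] none (some i)).toList <+: (ws[j]).toList)) = false
        ↔ cpB (ws[k]).toList (ws[j]).toList < i) := by
    intro j hj hjk
    rw [decide_eq_false_iff_not, hptl,
      ← cpB_le_iff_take_prefix _ _ _ (by omega : i.toNat ≤ (ws[k]).toList.length), hcast]
    omega
  have hiff := countP_eq_one_iff_index ws
    (fun u => decide ((PySem.Str.slice ws[k] none (some i)).toList <+: u.toList)) k hk hself
  constructor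
  · intro he j hj hjk
    exact (hcp j hj hjk).mp (hiff.mp (by omega) j hj hjk)
  · intro hall
    have := hiff.mpr (fun j hj hjk => (hcp j hj hjk).mpr (hall j hj hjk))
    omega

theorem countKeysGo_char (cnt : PySem.Dict String Int) (w : String) (F : Int) (hF : 0 ≤ F)
    (hc : ∀ i : Int, 1 ≤ i → i ≤ (w.toList.length : Int) →
      ((cnt.getD (PySem.Str.slice w none (some i)) 0 == 1) = decide (F < i))) :
    ∀ (a : Nat), 1 ≤ a → (a : Int) ≤ F + 1 → a ≤ w.toList.length + 1 →
    countKeysGo cnt w (PySem.List.pyRange a ((w.toList.length : Int) + 1) 1) ((a : Int) - 1)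
      = min (w.toList.length : Int) (F + 1) := by
  suffices H : ∀ (d a : Nat), w.toList.length + 1 - a = d → 1 ≤ a → (a : Int) ≤ F + 1 →
      a ≤ w.toList.length + 1 →
      countKeysGo cnt w (PySem.List.pyRange a ((w.toList.length : Int) + 1) 1) ((a : Int) - 1)
        = min (w.toList.length : Int) (F + 1) by
    intro a h1 h2 h3
    exact H _ a rfl h1 h2 h3
  intro d
  induction d with
  | zero =>
    intro a hd h1 h2 h3
    have ha : a = w.toList.length + 1 := by omega
    subst ha
    rw [PySem.List.pyRange_one_eq_nil (by push_cast; omega)]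
    simp only [countKeysGo]
    omega
  | succ d ih =>
    intro a hd h1 h2 h3
    have haL : a ≤ w.toList.length := by omega
    rw [PySem.List.pyRange_one_cons (by push_cast; omega)]
    simp only [countKeysGo]
    rw [hc a (by omega) (by omega)]
    by_cases hbr : F < (a : Int)
    · rw [if_pos (by simpa using hbr)]
      have : F = (a : Int) - 1 := by omega
      omega
    · rw [if_neg (by simpa using hbr)]
      have hcast : (a : Int) + 1 = ((a + 1 : Nat) : Int) := by omega
      have := ih (a + 1) (by omega) (by omega) (by omega) (by omega)
      rw [hcast]
      have hacc : ((a + 1 : Nat) : Int) - 1 = (a : Int) - 1 + 1 := by omega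
      rw [← hacc] at *
      exact this

theorem countKeys_eq (ws : List String) (k : Nat) (hk : k < ws.length) :
    countKeys (cntOf ws) ws[k]
      = min (((ws[k]).toList.length : Nat) : Int) (maxOther ws k ws[k] + 1) := by
  have hF := maxOther_nonneg ws k ws[k]
  have := countKeysGo_char (cntOf ws) ws[k] (maxOther ws k ws[k]) hF
    (fun i h1 h2 => cnt_cond ws k hk i h1 h2) 1 (by omega) (by omega) (by omega)
  rw [countKeys, PySem.Str.len_eq]
  simpa using this

theorem term_eq_maxOther (ws : List String) (hp : ws.Pairwise (· ≤ ·)) (k : Nat)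
    (hk : k < ws.length) :
    max (if (k : Int) > 0 then common_prefix (PySem.List.pyGetD ws ((k : Int) - 1) "") ws[k] else 0)
        (if (k : Int) < PySem.List.len ws - 1 then common_prefix (PySem.List.pyGetD ws ((k : Int) + 1) "") ws[k] else 0)
      = maxOther ws k ws[k] := term_eq ws hp k hk

theorem foldl_add_enum_eq {gA : Int × String → Int} {gB : String → Int} :
    ∀ (ws : List String) (s c : Int),
      (∀ (k : Nat), k < ws.length → ∀ (h : k < ws.length), gA (s + (k : Int), ws[k]) = gB ws[k]) →
      (PySem.List.enumerate ws s).foldl (fun a x => a + gA x) c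
        = ws.foldl (fun a x => a + gB x) c := by
  intro ws
  induction ws with
  | nil => intro s c _; rfl
  | cons w t ih =>
    intro s c h
    rw [PySem.List.enumerate_cons]
    simp only [List.foldl_cons]
    have h0 : gA (s, w) = gB w := by
      have := h 0 (by simp) (by simp)
      simpa using this
    rw [h0]
    apply ih
    intro k hk hk'
    have := h (k + 1) (by simpa using Nat.succ_lt_succ hk) (by simpa using Nat.succ_lt_succ hk)
    simp only [List.getElem_cons_succ] at this
    have hcast : s + ((k + 1 : Nat) : Int) = s + 1 + (k : Int) := by push_cast; ring
    rw [hcast] at this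
    exact this

theorem solution_eq (words : List String) : solution words = solution_alt words := by
  unfold solution solution_alt
  have hp : (PySem.List.sorted words (fun w => w) false).Pairwise (· ≤ ·) :=
    PySem.List.sorted_pairwise words (fun w => w)
  set ws := PySem.List.sorted words (fun w => w) false with hws
  have hterm : ∀ (k : Nat) (hk : k < ws.length),
      min (PySem.Str.len ws[k])
        (max (if (k : Int) > 0 then common_prefix (PySem.List.pyGetD ws ((k : Int) - 1) "") ws[k] else 0)
             (if (k : Int) < PySem.List.len ws - 1 then common_prefix (PySem.List.pyGetD ws ((k : Int) + 1) "") ws[k] else 0) + 1)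
        = countKeys (cntOf ws) ws[k] := by
    intro k hk
    rw [countKeys_eq ws k hk, PySem.Str.len_eq, term_eq_maxOther ws hp k hk]
  apply foldl_add_enum_eq ws 0 0
  intro k hk hk'
  simp only [zero_add]
  exact hterm k hk

-- ===== VERDICT (by name: the statement is the Claim_ definition above) =====
theorem solution_spec : Claim_equal_solution := by
  intro words _
  show solution words = solution_alt words
  exact solution_eq words
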